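-- pv_equiv track=rewrite | github.com/xinyadu/grit_doc_event_entity | data/muc/scripts/num_mention_per_entity.py | num_mentions
-- ===== SOURCE A (Python) =====
-- def num_mentions(entity):
--     entity = sorted(entity, key = lambda m : len(m[0]), reverse=True)
--     entity_no_overlap = []
--     for candidate_m in entity:
--         to_add = True
--         for m in entity_no_overlap:
--             if candidate_m[0] in m[0]:
--                 to_add = False
--         if to_add:
--             entity_no_overlap.append(candidate_m)
--     return len(entity_no_overlap)
-- ===== SOURCE B (Python) =====
-- def num_mentions(entity):
--     strs = {m[0] for m in entity}
--     return sum(1 for s in strs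
--                if not any(len(s) < len(t) and s in t for t in strs))
-- ===== Notes on version B (the rewrite author's own statement) =====
-- stated objective: alternative
-- what changed: B drops A's length-sort and greedy accumulator scan entirely: it deduplicates the first strings into a set and counts those that are not a substring of a strictly longer string in the set.
import Mathlib
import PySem

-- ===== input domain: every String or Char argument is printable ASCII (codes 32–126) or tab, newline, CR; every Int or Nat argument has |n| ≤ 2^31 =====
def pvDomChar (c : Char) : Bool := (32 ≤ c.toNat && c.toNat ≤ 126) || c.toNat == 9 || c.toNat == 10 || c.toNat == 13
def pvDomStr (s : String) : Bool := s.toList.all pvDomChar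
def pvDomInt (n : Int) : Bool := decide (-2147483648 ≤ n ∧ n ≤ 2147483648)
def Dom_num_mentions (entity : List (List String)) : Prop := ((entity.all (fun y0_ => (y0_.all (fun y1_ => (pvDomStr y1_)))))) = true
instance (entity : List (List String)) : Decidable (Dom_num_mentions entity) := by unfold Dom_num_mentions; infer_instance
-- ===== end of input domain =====

-- B replaces A's sort-then-greedy quadratic scan by deduplicating the first strings into a set
-- and counting those not contained in a strictly longer one (objective: alternative, no sort needed).

-- ===== PORT A =====
def num_mentions (entity : List (List String)) : Int :=
  let entity2 := PySem.List.sorted entity (fun m => PySem.Str.len (PySem.List.pyGetD m 0 "")) true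
  let keep := entity2.foldl (fun acc c =>
    let toAdd := acc.foldl (fun b m =>
      if PySem.Str.isIn (PySem.List.pyGetD c 0 "") (PySem.List.pyGetD m 0 "") then false else b) true
    if toAdd then acc ++ [c] else acc) ([] : List (List String))
  (keep.length : Int)

-- ===== PORT B =====
def num_mentions_alt (entity : List (List String)) : Int :=
  let strs := PySem.Set.ofList (entity.map (fun m => PySem.List.pyGetD m 0 ""))
  ((strs.filter (fun s => !(strs.any (fun t =>
      decide (PySem.Str.len s < PySem.Str.len t) && PySem.Str.isIn s t)))).length : Int)

-- ===== PRECONDITION & SPEC =====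
-- Pre_ excludes entities containing an empty mention list, on which Python A raises IndexError at m[0].
def Pre_num_mentions (entity : List (List String)) : Prop := ∀ m ∈ entity, m ≠ []
instance (entity : List (List String)) : Decidable (Pre_num_mentions entity) := by unfold Pre_num_mentions; infer_instance
def pvWitness_num_mentions : List (List String) := [["ab"], ["a", "x"], ["cd"]]
def Spec_num_mentions (entity : List (List String)) (out : Int) : Prop := out = num_mentions_alt entity
instance (entity : List (List String)) (out : Int) : Decidable (Spec_num_mentions entity out) := by unfold Spec_num_mentions; infer_instance

-- ===== CLAIM (what is proved, stated in full; the proofs are below) =====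
def Claim_equal_num_mentions : Prop := ∀ (entity : List (List String)), Dom_num_mentions entity → Pre_num_mentions entity → Spec_num_mentions entity (num_mentions entity)

-- ===== LEMMAS AND PROOFS =====

-- first string of a mention, as both ports read it
def pvFst (m : List String) : String := PySem.List.pyGetD m 0 ""

-- "s is maximal among S": not a substring of a strictly longer string of S
def pvMax (S : List String) (s : String) : Prop :=
  ∀ t ∈ S, PySem.Str.len s < PySem.Str.len t → PySem.Str.isIn s t = false

-- one step of A's greedy loop, with the inner scan summarised by List.any
def pvStep (acc : List (List String)) (c : List String) : List (List String) :=
  if acc.any (fun m => PySem.Str.isIn (pvFst c) (pvFst m)) then acc else acc ++ [c]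

lemma pvInner_eq_any (x : String) (acc : List (List String)) (b : Bool) :
    acc.foldl (fun b m => if PySem.Str.isIn x (PySem.List.pyGetD m 0 "") then false else b) b
      = (b && !acc.any (fun m => PySem.Str.isIn x (pvFst m))) := by
  induction acc generalizing b with
  | nil => simp
  | cons m t ih =>
    simp only [List.foldl_cons, List.any_cons, pvFst]
    cases h : PySem.Str.isIn x (PySem.List.pyGetD m 0 "")
    · simp only [Bool.false_eq_true, if_false, ih, pvFst, Bool.false_or]
    · simp only [if_true, ih, pvFst, Bool.true_or, Bool.not_true, Bool.and_false]
      cases b <;> rfl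

lemma pvStepFun_eq :
    (fun (acc : List (List String)) (c : List String) =>
      let toAdd := acc.foldl (fun b m =>
        if PySem.Str.isIn (PySem.List.pyGetD c 0 "") (PySem.List.pyGetD m 0 "") then false else b) true
      if toAdd then acc ++ [c] else acc) = pvStep := by
  funext acc c
  show (if acc.foldl _ true then acc ++ [c] else acc) = pvStep acc c
  rw [pvInner_eq_any, Bool.true_and, pvStep]
  simp only [show PySem.List.pyGetD c 0 "" = pvFst c from rfl]
  cases h : acc.any (fun m => PySem.Str.isIn (pvFst c) (pvFst m))
  · simp
  · simp

lemma pvMono (L : List (List String)) : ∀ acc c, c ∈ acc → c ∈ L.foldl pvStep acc := by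
  induction L with
  | nil => intro acc c h; simpa using h
  | cons d t ih =>
    intro acc c h
    simp only [List.foldl_cons]
    refine ih _ _ ?_
    rw [pvStep]
    cases hc : acc.any (fun m => PySem.Str.isIn (pvFst d) (pvFst m))
    · simp [h]
    · simpa using h

lemma pvIsIn_refl (s : String) : PySem.Str.isIn s s = true := by
  rw [PySem.Str.isIn_iff_infix]

lemma pvIsIn_trans {a b c : String} (h1 : PySem.Str.isIn a b = true) (h2 : PySem.Str.isIn b c = true) :
    PySem.Str.isIn a c = true := by
  rw [PySem.Str.isIn_iff_infix] at *
  exact h1.trans h2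

lemma pvIsIn_len_le {a b : String} (h : PySem.Str.isIn a b = true) :
    PySem.Str.len a ≤ PySem.Str.len b := by
  rw [PySem.Str.isIn_iff_infix] at h
  simp only [PySem.Str.len_eq]
  exact_mod_cast h.sublist.length_le

lemma pvIsIn_eq_of_len {a b : String} (h : PySem.Str.isIn a b = true)
    (hl : PySem.Str.len a = PySem.Str.len b) : a = b := by
  rw [PySem.Str.isIn_iff_infix] at h
  simp only [PySem.Str.len_eq, Int.natCast_inj] at hl
  exact String.toList_inj.mp (h.sublist.eq_of_length hl)

-- Main invariant lemma for A's greedy loop.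
lemma pvLoop_main (S : List String) :
    ∀ (L acc : List (List String)) (done : List String),
    (done ++ L.map pvFst).Pairwise (fun a b => PySem.Str.len b ≤ PySem.Str.len a) →
    S.Perm (done ++ L.map pvFst) →
    (∀ d ∈ done, ∃ a ∈ acc, PySem.Str.isIn d (pvFst a) = true) →
    (∀ a ∈ acc, pvFst a ∈ done ∧ pvMax S (pvFst a)) →
    (acc.map pvFst).Nodup →
    (∀ a ∈ L.foldl pvStep acc, pvFst a ∈ S ∧ pvMax S (pvFst a)) ∧
    (∀ x ∈ L.map pvFst, pvMax S x → x ∈ (L.foldl pvStep acc).map pvFst) ∧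
    ((L.foldl pvStep acc).map pvFst).Nodup := by
  intro L
  induction L with
  | nil =>
    intro acc done hdesc hperm hI1 hI2 hI3
    refine ⟨?_, by simp, by simpa using hI3⟩
    intro a ha
    simp only [List.foldl_nil] at ha
    obtain ⟨hd, hm⟩ := hI2 a ha
    exact ⟨hperm.symm.mem_iff.mp (by simp [hd]), hm⟩
  | cons c rest ih =>
    intro acc done hdesc hperm hI1 hI2 hI3
    have hmem_x : pvFst c ∈ S := hperm.symm.mem_iff.mp (by simp)
    -- any t ∈ S strictly longer than pvFst c lies in done
    have hlong : ∀ t ∈ S, PySem.Str.len (pvFst c) < PySem.Str.len t → t ∈ done := by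
      intro t ht hlt
      have hmem := hperm.mem_iff.mp ht
      simp only [List.mem_append, List.map_cons, List.mem_cons] at hmem
      rcases hmem with h | h | h
      · exact h
      · subst h; omega
      · exfalso
        have hp := (List.pairwise_append.mp hdesc).2.1
        simp only [List.map_cons] at hp
        have := (List.pairwise_cons.mp hp).1 t h
        omega
    simp only [List.foldl_cons]
    by_cases hAdd : acc.any (fun m => PySem.Str.isIn (pvFst c) (pvFst m)) = true
    · -- pvFst c is dropped: it is a substring of some kept string
      obtain ⟨m, hm, hin⟩ := List.any_eq_true.mp hAdd
      have hstep : pvStep acc c = acc := by rw [pvStep, if_pos hAdd]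
      rw [hstep]
      have hIH := ih acc (done ++ [pvFst c])
        (by simpa [List.append_assoc] using hdesc)
        (by simpa [List.append_assoc] using hperm)
        (by intro d hd
            rcases List.mem_append.mp hd with h | h
            · exact hI1 d h
            · simp only [List.mem_singleton] at h
              exact ⟨m, hm, h ▸ hin⟩)
        (by intro a ha
            obtain ⟨hd, hmx⟩ := hI2 a ha
            exact ⟨List.mem_append.mpr (Or.inl hd), hmx⟩)
        hI3
      refine ⟨hIH.1, ?_, hIH.2.2⟩
      intro y hy hmax
      simp only [List.map_cons, List.mem_cons] at hy
      rcases hy with h | h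
      · rw [h] at hmax ⊢
        have hle := pvIsIn_len_le hin
        have hfm : pvFst m ∈ S := hperm.symm.mem_iff.mp (by simp [(hI2 m hm).1])
        have heq : pvFst c = pvFst m := by
          rcases lt_or_eq_of_le hle with hlt | he
          · exact absurd hin (by rw [hmax (pvFst m) hfm hlt]; simp)
          · exact pvIsIn_eq_of_len hin he
        rw [heq]
        exact List.mem_map.mpr ⟨m, pvMono rest acc m hm, rfl⟩
      · exact hIH.2.1 y h hmax
    · -- pvFst c is added
      have hnone : ∀ m ∈ acc, PySem.Str.isIn (pvFst c) (pvFst m) = false := by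
        intro m hm
        by_contra h
        simp only [Bool.not_eq_false] at h
        exact hAdd (List.any_eq_true.mpr ⟨m, hm, h⟩)
      have hstep : pvStep acc c = acc ++ [c] := by
        rw [pvStep, if_neg hAdd]
      rw [hstep]
      -- pvFst c is maximal
      have hmaxx : pvMax S (pvFst c) := by
        intro t ht hlt
        by_contra h
        simp only [Bool.not_eq_false] at h
        obtain ⟨a, ha, hta⟩ := hI1 t (hlong t ht hlt)
        exact absurd (pvIsIn_trans h hta) (by rw [hnone a ha]; simp)
      have hIH := ih (acc ++ [c]) (done ++ [pvFst c])
        (by simpa [List.append_assoc] using hdesc)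
        (by simpa [List.append_assoc] using hperm)
        (by intro d hd
            rcases List.mem_append.mp hd with h | h
            · obtain ⟨a, ha, hda⟩ := hI1 d h
              exact ⟨a, List.mem_append.mpr (Or.inl ha), hda⟩
            · simp only [List.mem_singleton] at h
              exact ⟨c, by simp, h ▸ pvIsIn_refl (pvFst c)⟩)
        (by intro a ha
            rcases List.mem_append.mp ha with h | h
            · obtain ⟨hd, hmx⟩ := hI2 a h
              exact ⟨List.mem_append.mpr (Or.inl hd), hmx⟩
            · simp only [List.mem_singleton] at h
              subst h
              exact ⟨List.mem_append.mpr (Or.inr (by simp)), hmaxx⟩)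
        (by simp only [List.map_append, List.map_cons, List.map_nil]
            rw [List.nodup_append]
            refine ⟨hI3, List.nodup_singleton _, ?_⟩
            intro y hy b hb he
            have hb2 : b = pvFst c := by simpa using hb
            obtain ⟨m, hm, hfm⟩ := List.mem_map.mp hy
            have hcon := hnone m hm
            rw [hfm, he, hb2] at hcon
            exact absurd (hcon.symm.trans (pvIsIn_refl _)) Bool.false_ne_true)
      refine ⟨hIH.1, ?_, hIH.2.2⟩
      intro y hy hmax
      simp only [List.map_cons, List.mem_cons] at hy
      rcases hy with h | h
      · subst h
        exact List.mem_map.mpr ⟨c, pvMono rest _ c (by simp), rfl⟩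
      · exact hIH.2.1 y h hmax

-- membership characterisation of B's filtered set
lemma pvAlt_mem (S : List String) (x : String) :
    (x ∈ (PySem.Set.ofList S).filter (fun s => !((PySem.Set.ofList S : List String).any (fun t =>
        decide (PySem.Str.len s < PySem.Str.len t) && PySem.Str.isIn s t))))
      ↔ x ∈ S ∧ pvMax S x := by
  rw [List.mem_filter]
  simp only [PySem.Set.mem_ofList, Bool.not_eq_true', List.any_eq_false, Bool.and_eq_true,
    decide_eq_true_eq, not_and, pvMax]
  constructor
  · rintro ⟨h1, h2⟩
    exact ⟨h1, fun t ht hlt => by simpa using h2 t ht hlt⟩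
  · rintro ⟨h1, h2⟩
    exact ⟨h1, fun t ht hlt => by simpa using h2 t ht hlt⟩

-- ===== VERDICT (by name: the statement is the Claim_ definition above) =====
theorem num_mentions_spec : Claim_equal_num_mentions := by
  intro entity _ _
  unfold Spec_num_mentions num_mentions num_mentions_alt
  rw [pvStepFun_eq]
  have hfst : (fun m : List String => PySem.List.pyGetD m 0 "") = pvFst := rfl
  rw [hfst]
  set S := entity.map pvFst with hS
  set L := PySem.List.sorted entity (fun m => PySem.Str.len (PySem.List.pyGetD m 0 "")) true with hL
  have hperm : S.Perm (([] : List String) ++ L.map pvFst) := by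
    rw [List.nil_append]
    exact (List.Perm.map pvFst (PySem.List.sorted_perm entity _ true)).symm
  have hdesc : (([] : List String) ++ L.map pvFst).Pairwise (fun a b => PySem.Str.len b ≤ PySem.Str.len a) := by
    rw [List.nil_append, List.pairwise_map]
    exact PySem.List.sorted_pairwise_rev entity _
  obtain ⟨h1, h2, h3⟩ := pvLoop_main S L [] [] hdesc hperm (by simp) (by simp) (by simp)
  set K := L.foldl pvStep [] with hK
  have hchar : ∀ x, x ∈ K.map pvFst ↔ x ∈ S ∧ pvMax S x := by
    intro x
    constructor
    · intro hx
      obtain ⟨a, ha, rfl⟩ := List.mem_map.mp hx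
      exact h1 a ha
    · rintro ⟨hxS, hmax⟩
      exact h2 x (by simpa using hperm.mem_iff.mp hxS) hmax
  have hFnodup : ((PySem.Set.ofList S).filter (fun s => !((PySem.Set.ofList S : List String).any (fun t =>
      decide (PySem.Str.len s < PySem.Str.len t) && PySem.Str.isIn s t)))).Nodup :=
    (PySem.Set.nodup_ofList S).filter _
  have hp : (K.map pvFst).Perm ((PySem.Set.ofList S).filter (fun s => !((PySem.Set.ofList S : List String).any (fun t =>
      decide (PySem.Str.len s < PySem.Str.len t) && PySem.Str.isIn s t)))) := by
    rw [List.perm_ext_iff_of_nodup h3 hFnodup]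
    intro x
    rw [hchar x, pvAlt_mem S x]
  have hlen := hp.length_eq
  rw [List.length_map] at hlen
  exact_mod_cast congrArg (Int.ofNat) hlen
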